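-- pv_equiv track=rewrite | github.com/arsensahakyan/PythonHomeworks | homework 6.0.py | diagonally2
-- ===== SOURCE A (Python) =====
-- def diagonally2(chessboard, queen_pos):
--     diag = []
--     ind = []
--     if 0 < queen_pos[0] + queen_pos[1] < 8:
--         diag = [chessboard[i][queen_pos[0] + queen_pos[1] - i] for i in range(queen_pos[0] + queen_pos[1], -1, -1)]
--         ind = [[i, queen_pos[0] + queen_pos[1] - i] for i in range(queen_pos[0] + queen_pos[1], -1, -1)]
--     elif queen_pos[0] + queen_pos[1] > 7:
--         diag = [chessboard[i][queen_pos[0] + queen_pos[1] - i] for i in range(7, queen_pos[0] + queen_pos[1] - 8, -1)]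
--         ind = [[i, queen_pos[0] + queen_pos[1] - i] for i in range(7, queen_pos[0] + queen_pos[1] - 8, -1)]
--
--     for elem in diag:
--         if str(elem) not in 'qrek':
--             diag[diag.index(elem)] = 'x'
--     for pos in ind:
--         chessboard[pos[0]][pos[1]] = diag[ind.index(pos)]
--
--     return chessboard
-- ===== SOURCE B (Python) =====
-- def diagonally2(chessboard, queen_pos):
--     # NOTE: mutates chessboard's rows in place, like the original.
--     s = queen_pos[0] + queen_pos[1]
--     if 0 < s < 8:
--         coords = [(i, s - i) for i in range(s, -1, -1)]
--     elif s > 7: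
--         coords = [(i, s - i) for i in range(7, s - 8, -1)]
--     else:
--         coords = []
--     for i, j in coords:
--         if str(chessboard[i][j]) not in 'qrek':
--             chessboard[i][j] = 'x'
--     return chessboard
-- ===== Notes on version B (the rewrite author's own statement) =====
-- stated objective: simpler
-- what changed: B drops A's diag/ind value lists and its two value-based .index lookup loops, marking the anti-diagonal in one direct in-place pass over the (i, s-i) coordinates with the same substring test.
import Mathlib
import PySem

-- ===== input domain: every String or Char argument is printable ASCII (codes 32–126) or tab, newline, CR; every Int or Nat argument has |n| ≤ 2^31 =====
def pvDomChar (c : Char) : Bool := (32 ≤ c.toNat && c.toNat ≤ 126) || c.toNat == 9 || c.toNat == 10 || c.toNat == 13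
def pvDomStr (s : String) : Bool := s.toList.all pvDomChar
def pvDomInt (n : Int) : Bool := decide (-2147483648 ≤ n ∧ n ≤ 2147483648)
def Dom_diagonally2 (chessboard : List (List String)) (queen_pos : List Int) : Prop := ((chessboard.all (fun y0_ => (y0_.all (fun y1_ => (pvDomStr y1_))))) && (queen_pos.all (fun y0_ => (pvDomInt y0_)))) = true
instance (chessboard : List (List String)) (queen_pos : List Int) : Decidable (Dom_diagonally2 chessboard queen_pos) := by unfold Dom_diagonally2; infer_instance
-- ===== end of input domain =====

-- B replaces A's diag/ind value lists and its two `.index`-based loops by one direct pass over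
-- the anti-diagonal coordinates (simpler decomposition); both Pythons mutate chessboard's rows
-- in place — the equivalence proved here is about the returned value.

-- ===== PORT A =====
-- shared indexing primitives: chessboard[i][j] read and write (Python raises out of range; Pre_ excludes that)
def pvCell (cb : List (List String)) (i j : Int) : String :=
  PySem.List.pyGetD (PySem.List.pyGetD cb i []) j ""

def pvSetCell (cb : List (List String)) (i j : Int) (v : String) : List (List String) :=
  PySem.List.pySetD cb i (PySem.List.pySetD (PySem.List.pyGetD cb i []) j v)

-- A's first loop: `for elem in diag: if str(elem) not in 'qrek': diag[diag.index(elem)] = 'x'`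
-- (iteration by position over the list being mutated, exactly as CPython does)
def pvMarkLoop (diag : List String) (t : Nat) : List String :=
  if h : t < diag.length then
    let elem := diag[t]
    if !PySem.Str.isIn elem "qrek" then
      pvMarkLoop (diag.set ((PySem.List.index? diag elem).getD 0) "x") (t + 1)
    else
      pvMarkLoop diag (t + 1)
  else diag
termination_by diag.length - t
decreasing_by all_goals simp_all [List.length_set]; omega

-- A's second loop: `for pos in ind: chessboard[pos[0]][pos[1]] = diag[ind.index(pos)]`
def pvWriteLoop (ind : List (List Int)) (diag2 : List String) (cb : List (List String)) : List (List String) :=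
  ind.foldl (fun cb2 pos =>
    pvSetCell cb2 (PySem.List.pyGetD pos 0 0) (PySem.List.pyGetD pos 1 0)
      (PySem.List.pyGetD diag2 ((((PySem.List.index? ind pos).getD 0 : Nat) : Int)) "")) cb

def diagonally2 (chessboard : List (List String)) (queen_pos : List Int) : List (List String) :=
  let s := PySem.List.pyGetD queen_pos 0 0 + PySem.List.pyGetD queen_pos 1 0
  let diag : List String :=
    if 0 < s ∧ s < 8 then (PySem.List.pyRange s (-1) (-1)).map (fun i => pvCell chessboard i (s - i))
    else if 7 < s then (PySem.List.pyRange 7 (s - 8) (-1)).map (fun i => pvCell chessboard i (s - i))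
    else []
  let ind : List (List Int) :=
    if 0 < s ∧ s < 8 then (PySem.List.pyRange s (-1) (-1)).map (fun i => [i, s - i])
    else if 7 < s then (PySem.List.pyRange 7 (s - 8) (-1)).map (fun i => [i, s - i])
    else []
  let diag2 := pvMarkLoop diag 0
  pvWriteLoop ind diag2 chessboard

-- ===== PORT B =====
def diagonally2_alt (chessboard : List (List String)) (queen_pos : List Int) : List (List String) :=
  let s := PySem.List.pyGetD queen_pos 0 0 + PySem.List.pyGetD queen_pos 1 0
  let coords : List (Int × Int) :=
    if 0 < s ∧ s < 8 then (PySem.List.pyRange s (-1) (-1)).map (fun i => (i, s - i))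
    else if 7 < s then (PySem.List.pyRange 7 (s - 8) (-1)).map (fun i => (i, s - i))
    else []
  coords.foldl (fun cb c =>
    if !PySem.Str.isIn (pvCell cb c.1 c.2) "qrek" then pvSetCell cb c.1 c.2 "x" else cb) chessboard

-- ===== PRECONDITION & SPEC =====
-- Pre_ excludes exactly the inputs where A raises IndexError: queen_pos shorter than 2, or an
-- anti-diagonal cell the marking needs (rows max 0 (s-7) … min s 7, column s-i in row i) missing.
def Pre_diagonally2 (chessboard : List (List String)) (queen_pos : List Int) : Prop :=
  2 ≤ queen_pos.length ∧
  (let s := PySem.List.pyGetD queen_pos 0 0 + PySem.List.pyGetD queen_pos 1 0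
   ∀ k ∈ List.range 8,
     (0 < s ∧ s < 15 ∧ max 0 (s - 7) ≤ (k : Int) ∧ (k : Int) ≤ min s 7) →
       ((k : Int) < (chessboard.length : Int) ∧
        s - (k : Int) < ((chessboard.getD k []).length : Int)))

instance (chessboard : List (List String)) (queen_pos : List Int) : Decidable (Pre_diagonally2 chessboard queen_pos) := by
  unfold Pre_diagonally2; infer_instance

def pvWitness_diagonally2 : List (List String) × List Int :=
  ([["q", "a"], ["b", "x"]], [0, 1])

def Spec_diagonally2 (chessboard : List (List String)) (queen_pos : List Int) (out : List (List String)) : Prop := out = diagonally2_alt chessboard queen_pos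
instance (chessboard : List (List String)) (queen_pos : List Int) (out : List (List String)) : Decidable (Spec_diagonally2 chessboard queen_pos out) := by unfold Spec_diagonally2; infer_instance

-- ===== CLAIM (what is proved, stated in full; the proofs are below) =====
def Claim_equal_diagonally2 : Prop := ∀ (chessboard : List (List String)) (queen_pos : List Int), Dom_diagonally2 chessboard queen_pos → Pre_diagonally2 chessboard queen_pos → Spec_diagonally2 chessboard queen_pos (diagonally2 chessboard queen_pos)

-- ===== LEMMAS AND PROOFS =====
-- the pointwise effect of A's marking loop on one cell value
def pvMark (v : String) : String := if PySem.Str.isIn v "qrek" then v else "x"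

theorem pvMark_x : pvMark "x" = "x" := by decide

-- A's self-mutating `for elem in diag` loop marks the list pointwise: the first t entries
-- are already marked, the rest are untouched; one induction step consumes the head of r.
theorem pvMarkLoop_eq (r l : List String) :
    pvMarkLoop (l.map pvMark ++ r) l.length = (l ++ r).map pvMark := by
  induction r generalizing l with
  | nil => rw [pvMarkLoop]; simp
  | cons v r' ih =>
    have hlen : l.length < (l.map pvMark ++ v :: r').length := by simp
    have hget : (l.map pvMark ++ v :: r')[l.length]'hlen = v := by
      rw [List.getElem_append_right (by simp)]; simp
    rw [pvMarkLoop, dif_pos hlen]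
    simp only [hget]
    by_cases hin : PySem.Str.isIn v "qrek"
    · have hmv : pvMark v = v := by unfold pvMark; rw [if_pos hin]
      have : l.map pvMark ++ v :: r' = (l ++ [v]).map pvMark ++ r' := by
        simp [hmv]
      rw [if_neg (by simpa [PySem.Str.isIn] using hin)]
      rw [this]
      have hl : l.length + 1 = (l ++ [v]).length := by simp
      rw [hl, ih (l ++ [v])]
      simp
    · have hmv : pvMark v = "x" := by unfold pvMark; rw [if_neg hin]
      rw [if_pos (by simp only [Bool.not_eq_true] at hin; simpa [PySem.Str.isIn] using hin)]
      by_cases hv : v ∈ l.map pvMark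
      · -- v already occurs among the marked prefix: then v = "x" and the set is a no-op
        have hvx : v = "x" := by
          obtain ⟨u, hu, hupm⟩ := List.mem_map.mp hv
          by_cases hc : PySem.Str.isIn u "qrek"
          · exfalso; rw [pvMark, if_pos hc] at hupm; rw [← hupm] at hin; exact hin hc
          · rw [pvMark, if_neg hc] at hupm; exact hupm.symm
        have hv' : v ∈ l.map pvMark ++ v :: r' := by simp
        have hsome : (PySem.List.index? (l.map pvMark ++ v :: r') v).isSome := by
          rw [PySem.List.index?_isSome_iff]; exact hv'
        obtain ⟨k, hk⟩ := Option.isSome_iff_exists.mp hsome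
        obtain ⟨hklt, hkeq, -⟩ := PySem.List.getElem_of_index?_eq_some hk
        have hset : (l.map pvMark ++ v :: r').set ((PySem.List.index? (l.map pvMark ++ v :: r') v).getD 0) "x"
            = l.map pvMark ++ v :: r' := by
          rw [hk]; simp only [Option.getD_some]
          rw [show ("x" : String) = (l.map pvMark ++ v :: r')[k]'hklt from by rw [hkeq, hvx]]
          exact List.set_getElem_self ..
        rw [hset]
        have : l.map pvMark ++ v :: r' = (l ++ [v]).map pvMark ++ r' := by
          simp [hvx, pvMark_x]
        rw [this]
        have hl : l.length + 1 = (l ++ [v]).length := by simp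
        rw [hl, ih (l ++ [v])]
        simp
      · -- first occurrence of v is the current position: set it to "x" = pvMark v
        have hidx : PySem.List.index? (l.map pvMark ++ v :: r') v = some (l.map pvMark).length := by
          rw [PySem.List.index?_eq_some_iff]
          exact ⟨l.map pvMark, r', rfl, rfl, hv⟩
        rw [hidx]
        simp only [Option.getD_some]
        have hset : (l.map pvMark ++ v :: r').set (l.map pvMark).length "x" = l.map pvMark ++ "x" :: r' := by
          simp
        rw [hset]
        have : l.map pvMark ++ "x" :: r' = (l ++ [v]).map pvMark ++ r' := by
          simp [hmv]
        rw [this]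
        have hl : l.length + 1 = (l ++ [v]).length := by simp
        rw [hl, ih (l ++ [v])]
        simp

theorem pvMarkLoop_zero (diag : List String) : pvMarkLoop diag 0 = diag.map pvMark := by
  simpa using pvMarkLoop_eq diag []

theorem pvLen_setCell (cb : List (List String)) (i j : Int) (v : String) (hi : 0 ≤ i) :
    (pvSetCell cb i j v).length = cb.length := by
  simp [pvSetCell, PySem.List.pySetD_of_nonneg _ _ hi]

theorem pvRow_setCell_ne (cb : List (List String)) (i j i' : Int) (v : String)
    (hi : 0 ≤ i) (hi' : 0 ≤ i') (hne : i ≠ i') :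
    PySem.List.pyGetD (pvSetCell cb i j v) i' [] = PySem.List.pyGetD cb i' [] := by
  have h1 : i.toNat ≠ i'.toNat := by omega
  rw [pvSetCell, PySem.List.pySetD_of_nonneg _ _ hi,
      PySem.List.pyGetD_of_nonneg _ _ hi', PySem.List.pyGetD_of_nonneg _ _ hi']
  rw [List.getD, List.getD, List.getElem?_set_ne h1]

theorem pvCell_setCell_ne (cb : List (List String)) (i j i' j' : Int) (v : String)
    (hi : 0 ≤ i) (hi' : 0 ≤ i') (hne : i ≠ i') :
    pvCell (pvSetCell cb i j v) i' j' = pvCell cb i' j' := by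
  unfold pvCell
  rw [pvRow_setCell_ne cb i j i' v hi hi' hne]

theorem pvSetCell_cell_self (cb : List (List String)) (i j : Int)
    (hi : 0 ≤ i) (hilt : i < (cb.length : Int)) (hj : 0 ≤ j)
    (hjlt : j < ((PySem.List.pyGetD cb i []).length : Int)) :
    pvSetCell cb i j (pvCell cb i j) = cb := by
  unfold pvSetCell pvCell
  rw [PySem.List.pyGetD_eq_getElem _ _ hj (by omega), PySem.List.pySetD_of_nonneg _ _ hj]
  rw [List.set_getElem_self]
  rw [PySem.List.pyGetD_eq_getElem _ _ hi (by omega), PySem.List.pySetD_of_nonneg _ _ hi]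
  exact List.set_getElem_self ..

-- A's write-back loop over ind, fed the pointwise-marked diag, is B's one-pass loop:
-- the coordinates have pairwise distinct rows, so each `.index` lookup is the loop position
-- and earlier writes never change a later read.
theorem pvWriteLoop_eq (coords : List (Int × Int)) (cb : List (List String))
    (hpair : coords.Pairwise (fun a b => a.1 ≠ b.1))
    (hval : ∀ c ∈ coords, 0 ≤ c.1 ∧ c.1 < (cb.length : Int) ∧ 0 ≤ c.2 ∧
            c.2 < ((PySem.List.pyGetD cb c.1 []).length : Int)) :
    pvWriteLoop (coords.map (fun c => [c.1, c.2])) (coords.map (fun c => pvMark (pvCell cb c.1 c.2))) cb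
      = coords.foldl (fun cb2 c =>
          if !PySem.Str.isIn (pvCell cb2 c.1 c.2) "qrek" then pvSetCell cb2 c.1 c.2 "x" else cb2) cb := by
  induction coords generalizing cb with
  | nil => rfl
  | cons c rest ih =>
    obtain ⟨h1, h2, h3, h4⟩ := hval c (by simp)
    obtain ⟨hhead, hrest⟩ := List.pairwise_cons.mp hpair
    have hvalrest : ∀ d ∈ rest, 0 ≤ d.1 ∧ d.1 < (cb.length : Int) ∧ 0 ≤ d.2 ∧
        d.2 < ((PySem.List.pyGetD cb d.1 []).length : Int) := by
      intro d hd; exact hval d (List.mem_cons_of_mem _ hd)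
    have hidx0 : PySem.List.index? ([c.1, c.2] :: rest.map (fun c => [c.1, c.2])) [c.1, c.2] = some 0 :=
      PySem.List.index?_cons_self ..
    have hstepA : pvSetCell cb (PySem.List.pyGetD [c.1, c.2] 0 0) (PySem.List.pyGetD [c.1, c.2] 1 0)
        (PySem.List.pyGetD (pvMark (pvCell cb c.1 c.2) :: rest.map (fun c => pvMark (pvCell cb c.1 c.2)))
          ((((PySem.List.index? ([c.1, c.2] :: rest.map (fun c => [c.1, c.2])) [c.1, c.2]).getD 0 : Nat) : Int)) "")
        = pvSetCell cb c.1 c.2 (pvMark (pvCell cb c.1 c.2)) := by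
      rw [hidx0]
      simp only [Option.getD_some, Nat.cast_zero, PySem.List.pyGetD_ofNat']
      rfl
    have hheadeq : pvSetCell cb c.1 c.2 (pvMark (pvCell cb c.1 c.2))
        = if !PySem.Str.isIn (pvCell cb c.1 c.2) "qrek" then pvSetCell cb c.1 c.2 "x" else cb := by
      by_cases hi : PySem.Str.isIn (pvCell cb c.1 c.2) "qrek"
      · rw [if_neg (by simpa [PySem.Str.isIn] using hi)]
        rw [show pvMark (pvCell cb c.1 c.2) = pvCell cb c.1 c.2 from by unfold pvMark; rw [if_pos hi]]
        exact pvSetCell_cell_self cb c.1 c.2 h1 h2 h3 h4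
      · rw [if_pos (by simp only [Bool.not_eq_true] at hi; simpa [PySem.Str.isIn] using hi)]
        rw [show pvMark (pvCell cb c.1 c.2) = "x" from by unfold pvMark; rw [if_neg hi]]
    have hne1 : ∀ d ∈ rest, c.1 ≠ d.1 := hhead
    have hd0 : ∀ d ∈ rest, (0:Int) ≤ d.1 := fun d hd => (hvalrest d hd).1
    have hrow : ∀ d ∈ rest, PySem.List.pyGetD (pvSetCell cb c.1 c.2 (pvMark (pvCell cb c.1 c.2))) d.1 []
        = PySem.List.pyGetD cb d.1 [] := by
      intro d hd
      exact pvRow_setCell_ne cb c.1 c.2 d.1 _ h1 (hd0 d hd) (hne1 d hd)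
    have hcell : ∀ d ∈ rest, pvCell (pvSetCell cb c.1 c.2 (pvMark (pvCell cb c.1 c.2))) d.1 d.2
        = pvCell cb d.1 d.2 := by
      intro d hd
      exact pvCell_setCell_ne cb c.1 c.2 d.1 d.2 _ h1 (hd0 d hd) (hne1 d hd)
    have hvals1 : ∀ d ∈ rest, 0 ≤ d.1 ∧
        d.1 < ((pvSetCell cb c.1 c.2 (pvMark (pvCell cb c.1 c.2))).length : Int) ∧ 0 ≤ d.2 ∧
        d.2 < ((PySem.List.pyGetD (pvSetCell cb c.1 c.2 (pvMark (pvCell cb c.1 c.2))) d.1 []).length : Int) := by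
      intro d hd
      obtain ⟨a, b, cc, dd⟩ := hvalrest d hd
      refine ⟨a, ?_, cc, ?_⟩
      · rw [pvLen_setCell cb c.1 c.2 _ h1]; exact b
      · rw [hrow d hd]; exact dd
    have htail : ∀ cb1 : List (List String), (rest.map (fun c => [c.1, c.2])).foldl
        (fun cb2 pos => pvSetCell cb2 (PySem.List.pyGetD pos 0 0) (PySem.List.pyGetD pos 1 0)
          (PySem.List.pyGetD (pvMark (pvCell cb c.1 c.2) :: rest.map (fun c => pvMark (pvCell cb c.1 c.2)))
            ((((PySem.List.index? ([c.1, c.2] :: rest.map (fun c => [c.1, c.2])) pos).getD 0 : Nat) : Int)) "")) cb1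
        = pvWriteLoop (rest.map (fun c => [c.1, c.2])) (rest.map (fun c => pvMark (pvCell cb c.1 c.2))) cb1 := by
      intro cb1
      unfold pvWriteLoop
      apply PySem.List.foldl_congr_mem
      intro acc pos hpos
      obtain ⟨d, hd, rfl⟩ := List.mem_map.mp hpos
      have hne : [c.1, c.2] ≠ [d.1, d.2] := by
        intro hcontra
        exact hne1 d hd (by injection hcontra)
      rw [PySem.List.index?_cons_of_ne (x := [c.1, c.2]) (v := [d.1, d.2]) (rest.map (fun c => [c.1, c.2])) hne]
      obtain ⟨k, hk⟩ := Option.isSome_iff_exists.mp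
        ((PySem.List.index?_isSome_iff (rest.map (fun c => [c.1, c.2])) [d.1, d.2]).mpr (List.mem_map.mpr ⟨d, hd, rfl⟩))
      rw [hk]
      simp only [Option.map_some, Option.getD_some]
      congr 1
      rw [show (((k + 1 : Nat)) : Int) = (((k:Nat)) : Int) + 1 from by push_cast; ring]
      rw [show ((k:Int) + 1) = (((k+1 : Nat)) : Int) from by push_cast; ring]
      rw [PySem.List.pyGetD_natCast, PySem.List.pyGetD_natCast]
      rfl
    simp only [List.map_cons, pvWriteLoop, List.foldl_cons]
    rw [hstepA]
    rw [show (rest.map (fun c => [c.1, c.2])).foldl _ (pvSetCell cb c.1 c.2 (pvMark (pvCell cb c.1 c.2)))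
          = pvWriteLoop (rest.map (fun c => [c.1, c.2])) (rest.map (fun c => pvMark (pvCell cb c.1 c.2)))
              (pvSetCell cb c.1 c.2 (pvMark (pvCell cb c.1 c.2))) from htail _]
    rw [show rest.map (fun d => pvMark (pvCell cb d.1 d.2))
          = rest.map (fun d => pvMark (pvCell (pvSetCell cb c.1 c.2 (pvMark (pvCell cb c.1 c.2))) d.1 d.2)) from
        List.map_congr_left (fun d hd => by rw [hcell d hd])]
    rw [ih _ hrest (hvals1)]
    rw [← hheadeq]

theorem pvPairwise_ne_pyRange_neg_one (a b : Int) :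
    (PySem.List.pyRange a b (-1)).Pairwise (fun x y => x ≠ y) := by
  rw [PySem.List.pyRange_neg_one_eq_reverse]
  rw [List.pairwise_reverse]
  exact (PySem.List.pairwise_lt_pyRange_one _ _).imp (fun h => by omega)

-- one branch of A (one countdown range) equals the same branch of B
theorem pvBranch_eq (cb : List (List String)) (a b s : Int)
    (hval : ∀ i ∈ PySem.List.pyRange a b (-1), 0 ≤ i ∧ i < (cb.length : Int) ∧ 0 ≤ s - i ∧
            s - i < ((PySem.List.pyGetD cb i []).length : Int)) :
    pvWriteLoop ((PySem.List.pyRange a b (-1)).map (fun i => [i, s - i]))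
        (pvMarkLoop ((PySem.List.pyRange a b (-1)).map (fun i => pvCell cb i (s - i))) 0) cb
      = ((PySem.List.pyRange a b (-1)).map (fun i => (i, s - i))).foldl
          (fun cb2 c => if !PySem.Str.isIn (pvCell cb2 c.1 c.2) "qrek" then pvSetCell cb2 c.1 c.2 "x" else cb2) cb := by
  rw [pvMarkLoop_zero]
  have hdiag : ((PySem.List.pyRange a b (-1)).map (fun i => pvCell cb i (s - i))).map pvMark
      = ((PySem.List.pyRange a b (-1)).map (fun i => (i, s - i))).map (fun c => pvMark (pvCell cb c.1 c.2)) := by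
    rw [List.map_map, List.map_map]; rfl
  have hind : (PySem.List.pyRange a b (-1)).map (fun i => [i, s - i])
      = ((PySem.List.pyRange a b (-1)).map (fun i => (i, s - i))).map (fun c => [c.1, c.2]) := by
    rw [List.map_map]; rfl
  rw [hdiag, hind]
  apply pvWriteLoop_eq
  · rw [List.pairwise_map]
    exact (pvPairwise_ne_pyRange_neg_one a b).imp (fun h => by simpa using h)
  · intro c hc
    obtain ⟨i, hi, rfl⟩ := List.mem_map.mp hc
    exact hval i hi

-- ===== VERDICT (by name: the statement is the Claim_ definition above) =====
theorem diagonally2_spec : Claim_equal_diagonally2 := by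
  unfold Claim_equal_diagonally2
  intro cb qp _hdom hpre
  unfold Spec_diagonally2 diagonally2 diagonally2_alt
  obtain ⟨hq, hsh⟩ := hpre
  simp only []
  set s := PySem.List.pyGetD qp 0 0 + PySem.List.pyGetD qp 1 0 with hs
  have key : ∀ i : Int, 0 < s → s < 15 → max 0 (s - 7) ≤ i → i ≤ min s 7 →
      0 ≤ i ∧ i < (cb.length : Int) ∧ 0 ≤ s - i ∧ s - i < ((PySem.List.pyGetD cb i []).length : Int) := by
    intro i hp hlt hlo hhi
    have h0i : 0 ≤ i := le_trans (le_max_left _ _) hlo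
    have hk8 : i.toNat < 8 := by omega
    obtain ⟨hA, hB⟩ := hsh i.toNat (List.mem_range.mpr hk8)
      ⟨hp, hlt, by omega, by omega⟩
    have hgd : PySem.List.pyGetD cb i [] = cb.getD i.toNat [] :=
      PySem.List.pyGetD_of_nonneg _ _ h0i
    refine ⟨h0i, by omega, by omega, ?_⟩
    rw [hgd]
    omega
  by_cases hc1 : 0 < s ∧ s < 8
  · rw [if_pos hc1, if_pos hc1, if_pos hc1]
    apply pvBranch_eq
    intro i hi
    rw [PySem.List.mem_pyRange_neg_one] at hi
    exact key i hc1.1 (by omega) (by omega) (by omega)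
  · rw [if_neg hc1, if_neg hc1, if_neg hc1]
    by_cases hc2 : 7 < s
    · rw [if_pos hc2, if_pos hc2, if_pos hc2]
      apply pvBranch_eq
      intro i hi
      rw [PySem.List.mem_pyRange_neg_one] at hi
      exact key i (by omega) (by omega) (by omega) (by omega)
    · rw [if_neg hc2, if_neg hc2, if_neg hc2]
      rfl
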